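-- pv_equiv track=rewrite | github.com/WoodCedar/Vegetation-phenology-fitting-calculation | Vegetation-phenology-fitting-calculation.py | SOS
-- ===== SOURCE A (Python) =====
-- def SOS(li):#左侧
--     max = -9999
--     max_index =-1
--     for i in range(len(li)):
--         if (li[i] > max):
--             max = li[i]
--             max_index = i#找到最大值
--     select1 = 0;index1 = 0
--     for i in range(1, max_index):
--         tmp = li[i]-li[i-1]
--         if (tmp > select1):
--             select1 =tmp
--             index1 = i
--     result = index1+1
--     return result
-- ===== SOURCE B (Python) =====
-- def SOS(li):  # single interleaved pass: track max and running best consecutive rise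
--     mx = -9999
--     select1 = 0
--     index1 = 0
--     best = 0
--     best_i = 0
--     prev = 0
--     for i, v in enumerate(li):
--         if v > mx:
--             mx = v
--             select1 = best   # commit best rise seen strictly before this new maximum
--             index1 = best_i
--         if i >= 1:
--             d = v - prev
--             if d > best:
--                 best = d
--                 best_i = i
--         prev = v
--     return index1 + 1
-- ===== Notes on version B (the rewrite author's own statement) =====
-- stated objective: alternative
-- what changed: Replaced A's two sequential index-loop scans (find the max index, then rescan prefix pairs for the best consecutive rise) by a single interleaved pass that maintains the running best consecutive rise and snapshots it each time a new maximum is found.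
import Mathlib
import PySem

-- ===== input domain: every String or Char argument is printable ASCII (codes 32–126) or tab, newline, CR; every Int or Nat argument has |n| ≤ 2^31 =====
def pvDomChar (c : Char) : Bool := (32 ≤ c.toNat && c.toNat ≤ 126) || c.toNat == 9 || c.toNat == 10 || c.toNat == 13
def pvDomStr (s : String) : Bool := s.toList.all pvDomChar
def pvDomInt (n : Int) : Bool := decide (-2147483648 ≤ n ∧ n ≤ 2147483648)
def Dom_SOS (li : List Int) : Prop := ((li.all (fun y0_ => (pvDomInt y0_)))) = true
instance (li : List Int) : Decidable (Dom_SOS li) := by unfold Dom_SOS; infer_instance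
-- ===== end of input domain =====

-- B replaces A's two sequential scans by one interleaved pass that snapshots the
-- running best consecutive rise each time a new maximum appears (objective: alternative).

-- ===== PORT A =====
def SOS (li : List Int) : Int :=
  -- first loop: max / max_index (indices of range(len(li)) are always in range, so pyGetD is exact)
  let p := (PySem.List.pyRange 0 (li.length : Int) 1).foldl
    (fun (s : Int × Int) i =>
      if PySem.List.pyGetD li i 0 > s.1 then (PySem.List.pyGetD li i 0, i) else s)
    (-9999, -1)
  -- second loop: best consecutive increase over range(1, max_index)
  let q := (PySem.List.pyRange 1 p.2 1).foldl
    (fun (s : Int × Int) i =>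
      let tmp := PySem.List.pyGetD li i 0 - PySem.List.pyGetD li (i-1) 0
      if tmp > s.1 then (tmp, i) else s)
    (0, 0)
  q.2 + 1

-- ===== PORT B =====
-- state = (prev, mx, select1, index1, best, best_i)
def sosStep (s : Int × Int × Int × Int × Int × Int) (p : Int × Int) :
    Int × Int × Int × Int × Int × Int :=
  let m := if p.2 > s.2.1 then (p.2, s.2.2.2.2.1, s.2.2.2.2.2)
           else (s.2.1, s.2.2.1, s.2.2.2.1)
  let b := if 1 ≤ p.1 then
             (let d := p.2 - s.1
              if d > s.2.2.2.2.1 then (d, p.1) else (s.2.2.2.2.1, s.2.2.2.2.2))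
           else (s.2.2.2.2.1, s.2.2.2.2.2)
  (p.2, m.1, m.2.1, m.2.2, b.1, b.2)

def SOS_alt (li : List Int) : Int :=
  let s := (PySem.List.enumerate li 0).foldl sosStep (0, -9999, 0, 0, 0, 0)
  s.2.2.2.1 + 1

-- ===== PRECONDITION & SPEC =====
def Spec_SOS (li : List Int) (out : Int) : Prop := out = SOS_alt li
instance (li : List Int) (out : Int) : Decidable (Spec_SOS li out) := by unfold Spec_SOS; infer_instance

-- ===== CLAIM (what is proved, stated in full; the proofs are below) =====
def Claim_equal_SOS : Prop := ∀ (li : List Int), Dom_SOS li → Spec_SOS li (SOS li)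

-- ===== LEMMAS AND PROOFS =====

-- A's two loops, named for the proof (identical bodies to the folds inside SOS)
def loop1 (li : List Int) : Int × Int :=
  (PySem.List.pyRange 0 (li.length : Int) 1).foldl
    (fun (s : Int × Int) i =>
      if PySem.List.pyGetD li i 0 > s.1 then (PySem.List.pyGetD li i 0, i) else s)
    (-9999, -1)

def loop2 (li : List Int) (m : Int) : Int × Int :=
  (PySem.List.pyRange 1 m 1).foldl
    (fun (s : Int × Int) i =>
      let tmp := PySem.List.pyGetD li i 0 - PySem.List.pyGetD li (i-1) 0
      if tmp > s.1 then (tmp, i) else s)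
    (0, 0)

theorem SOS_eq (li : List Int) : SOS li = (loop2 li (loop1 li).2).2 + 1 := rfl

theorem pyGetD_append_lt (xs : List Int) (v : Int) (i : Int) (h0 : 0 ≤ i)
    (h : i < (xs.length : Int)) :
    PySem.List.pyGetD (xs ++ [v]) i 0 = PySem.List.pyGetD xs i 0 := by
  obtain ⟨k, rfl⟩ := Int.eq_ofNat_of_zero_le h0
  have hk : k < xs.length := by exact_mod_cast h
  simp [PySem.List.pyGetD_natCast, List.getD, List.getElem?_append_left hk]

theorem pyGetD_append_self (xs : List Int) (v : Int) :
    PySem.List.pyGetD (xs ++ [v]) (xs.length : Int) 0 = v := by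
  simp [PySem.List.pyGetD_natCast, List.getD]

theorem foldlA_agree (li : List Int) (v : Int) :
    (PySem.List.pyRange 0 (li.length : Int) 1).foldl
      (fun (s : Int × Int) i =>
        if PySem.List.pyGetD (li ++ [v]) i 0 > s.1 then (PySem.List.pyGetD (li ++ [v]) i 0, i) else s)
      (-9999, -1)
    = loop1 li := by
  unfold loop1
  apply PySem.List.foldl_congr_mem
  intro acc x hx
  rw [PySem.List.mem_pyRange_one] at hx
  rw [pyGetD_append_lt li v x hx.1 hx.2]

theorem loop1_append (li : List Int) (v : Int) :
    loop1 (li ++ [v]) =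
      if v > (loop1 li).1 then (v, (li.length : Int)) else loop1 li := by
  conv_lhs => unfold loop1
  have hlen : (((li ++ [v]).length : Int)) = (li.length : Int) + 1 := by simp
  rw [hlen, PySem.List.pyRange_one_succ_right (by positivity), List.foldl_append,
      foldlA_agree]
  simp

theorem loop2_append (li : List Int) (v : Int) (m : Int) (hm : m ≤ (li.length : Int)) :
    loop2 (li ++ [v]) m = loop2 li m := by
  unfold loop2
  apply PySem.List.foldl_congr_mem
  intro acc x hx
  rw [PySem.List.mem_pyRange_one] at hx
  simp only
  rw [pyGetD_append_lt li v x (by omega) (by omega),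
      pyGetD_append_lt li v (x-1) (by omega) (by omega)]

theorem loop1_snd_lt (li : List Int) : (loop1 li).2 < (li.length : Int) := by
  induction li using List.reverseRecOn with
  | nil => decide
  | append_singleton xs v ih =>
    rw [loop1_append]
    simp only [List.length_append, List.length_singleton]
    push_cast
    split_ifs <;> omega

theorem xs_last (xs : List Int) (v : Int) (hge : 1 ≤ (xs.length : Int)) :
    PySem.List.pyGetD (xs ++ [v]) ((xs.length : Int) - 1) 0 = xs.getLastD 0 := by
  rw [pyGetD_append_lt xs v _ (by omega) (by omega)]
  have hx : xs ≠ [] := by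
    cases xs with
    | nil => simp at hge
    | cons a t => simp
  have hc : ((xs.length : Int) - 1) = ((xs.length - 1 : Nat) : Int) := by
    cases xs with
    | nil => simp at hge
    | cons a t => omega
  rw [hc, PySem.List.pyGetD_natCast]
  rw [List.getLastD_eq_getLast?, List.getLast?_eq_getElem?]
  simp [List.getD]

theorem loop2_push (xs : List Int) (v : Int) (hge : 1 ≤ (xs.length : Int)) :
    loop2 (xs ++ [v]) ((xs.length : Int) + 1) =
      (if v - xs.getLastD 0 > (loop2 xs (xs.length : Int)).1
       then (v - xs.getLastD 0, (xs.length : Int))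
       else loop2 xs (xs.length : Int)) := by
  have hagree := loop2_append xs v (xs.length : Int) le_rfl
  unfold loop2 at hagree ⊢
  rw [PySem.List.pyRange_one_succ_right hge, List.foldl_append, hagree]
  simp only [List.foldl_cons, List.foldl_nil]
  rw [pyGetD_append_self, xs_last xs v hge]

-- the single-pass invariant: B's fold state after a prefix
theorem key (li : List Int) :
    (PySem.List.enumerate li 0).foldl sosStep (0, -9999, 0, 0, 0, 0)
      = (li.getLastD 0, (loop1 li).1, (loop2 li (loop1 li).2).1,
         (loop2 li (loop1 li).2).2, (loop2 li (li.length : Int)).1,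
         (loop2 li (li.length : Int)).2) := by
  induction li using List.reverseRecOn with
  | nil => decide
  | append_singleton xs v ih =>
    have hmi := loop1_snd_lt xs
    rw [PySem.List.enumerate_append, List.foldl_append, ih]
    have henum : PySem.List.enumerate [v] (0 + (xs.length : Int)) = [((xs.length : Int), v)] := by
      simp [PySem.List.enumerate_cons, PySem.List.enumerate_nil]
    rw [henum]
    simp only [List.foldl_cons, List.foldl_nil]
    have hlast : (xs ++ [v]).getLastD 0 = v := by simp
    have hlen : (((xs ++ [v]).length : Int)) = (xs.length : Int) + 1 := by simp
    by_cases hge : 1 ≤ (xs.length : Int)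
    · -- non-empty prefix: the diff update fires
      rw [hlast, hlen, loop2_push xs v hge]
      by_cases hmax : v > (loop1 xs).1
      · have h1 : loop1 (xs ++ [v]) = (v, (xs.length : Int)) := by
          rw [loop1_append, if_pos hmax]
        rw [h1]
        rw [loop2_append xs v (xs.length : Int) le_rfl]
        simp only [sosStep, hmax, if_pos, hge]
      · have h1 : loop1 (xs ++ [v]) = loop1 xs := by
          rw [loop1_append, if_neg hmax]
        rw [h1, loop2_append xs v (loop1 xs).2 (by omega)]
        simp only [sosStep, hmax, hge]
        split_ifs <;> simp_all
    · -- empty prefix: first iteration, no diff update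
      have h0 : xs.length = 0 := by omega
      have hx : xs = [] := List.length_eq_zero_iff.mp h0
      subst hx
      have r1 : PySem.List.pyRange 0 ((([] ++ [v] : List Int).length : Int)) 1 = [0] := by
        have hone : ((([] ++ [v] : List Int).length : Int)) = 1 := by simp
        rw [hone, PySem.List.pyRange_one_cons (by norm_num),
            PySem.List.pyRange_one_eq_nil (by norm_num)]
      have r2 : ∀ m : Int, m ≤ 1 → PySem.List.pyRange 1 m 1 = [] := fun m hm =>
        PySem.List.pyRange_one_eq_nil hm
      have l1 : loop1 ([] ++ [v]) = if v > -9999 then (v, 0) else (-9999, -1) := by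
        unfold loop1
        rw [r1]
        simp [PySem.List.pyGetD_zero_cons]
      have l2 : ∀ m : Int, m ≤ 1 → loop2 ([] ++ [v]) m = (0, 0) := by
        intro m hm
        unfold loop2
        rw [r2 m hm]
        rfl
      rw [hlast, hlen, l1]
      by_cases hv : v > -9999
      · rw [if_pos hv]
        rw [l2 0 (by omega), l2 ((([] : List Int).length : Int) + 1) (by simp)]
        simp [sosStep, hv, loop1, loop2, PySem.List.pyRange_one_eq_nil]
      · rw [if_neg hv]
        rw [l2 (-1) (by omega), l2 ((([] : List Int).length : Int) + 1) (by simp)]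
        simp [sosStep, hv, loop1, loop2, PySem.List.pyRange_one_eq_nil]

-- ===== VERDICT (by name: the statement is the Claim_ definition above) =====
theorem SOS_spec : Claim_equal_SOS := by
  intro li _
  unfold Spec_SOS SOS_alt
  rw [key, SOS_eq]
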